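-- pv_equiv track=rewrite | github.com/pizzawarrior/data_structures_and_algorithms | 3.two_pointers/tp2.py | dedupe_lst
-- ===== SOURCE A (Python) =====
-- def dedupe_lst(lst, end=None):
--     if end is None:
--         end = len(lst) - 1
--
--     if end <= 0:
--         return len(lst)
--
--     if lst[end] == lst[end - 1]:
--         lst.pop()
--     end -= 1
--
--     return dedupe_lst(lst, end)
-- ===== SOURCE B (Python) =====
-- def dedupe_lst(lst, end=None):
--     # Return value AND in-place mutation match A: A only ever pops from the
--     # tail, and all comparisons read indices <= end that the pops never touch,
--     # so one counting pass over the original list plus a single tail truncation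
--     # gives the same final list and length.
--     if end is None:
--         end = len(lst) - 1
--     dups = sum(1 for i in range(1, end + 1) if lst[i] == lst[i - 1])
--     if dups:
--         del lst[-dups:]
--     return len(lst)
-- ===== Notes on version B (the rewrite author's own statement) =====
-- stated objective: alternative
-- what changed: B replaces A's tail recursion with repeated tail-pops by a single counting pass over the untouched prefix (sum of adjacent-equal pairs up to end) followed by one tail truncation, using the invariant that A's pops never affect the indices it compares.
import Mathlib
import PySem

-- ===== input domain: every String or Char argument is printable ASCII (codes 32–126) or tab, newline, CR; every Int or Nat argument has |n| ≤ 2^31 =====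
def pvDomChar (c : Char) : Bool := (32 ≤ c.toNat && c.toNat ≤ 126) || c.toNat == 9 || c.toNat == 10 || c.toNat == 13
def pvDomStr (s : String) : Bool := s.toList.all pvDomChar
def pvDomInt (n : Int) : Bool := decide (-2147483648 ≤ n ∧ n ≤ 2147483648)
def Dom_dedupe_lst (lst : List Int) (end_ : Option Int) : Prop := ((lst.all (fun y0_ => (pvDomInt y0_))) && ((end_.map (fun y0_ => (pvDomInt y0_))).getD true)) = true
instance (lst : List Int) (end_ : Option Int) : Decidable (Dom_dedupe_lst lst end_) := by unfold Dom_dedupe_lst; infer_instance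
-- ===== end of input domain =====

-- B counts the adjacent-equal pairs in one pass and truncates the tail once,
-- instead of A's tail recursion that pops the last element at each equal pair;
-- equivalence is about the return value (both Pythons mutate lst identically).

-- ===== PORT A =====
-- A's recursion after the 'end is None' defaulting: end is a plain int here.
def dedupe_lst_core (lst : List Int) (e : Int) : Int :=
  if e ≤ 0 then (lst.length : Int)
  else
    match PySem.List.pyGet? lst e, PySem.List.pyGet? lst (e - 1) with
    | some a, some b =>
        dedupe_lst_core (if a == b then lst.dropLast else lst) (e - 1)
    | _, _ => 0   -- Python raises IndexError here (outside Pre_)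
termination_by e.toNat
decreasing_by omega

def dedupe_lst (lst : List Int) (end_ : Option Int) : Int :=
  let e := match end_ with
    | none => (lst.length : Int) - 1
    | some e => e
  dedupe_lst_core lst e

-- ===== PORT B =====
def dedupe_lst_alt (lst : List Int) (end_ : Option Int) : Int :=
  let e := match end_ with
    | none => (lst.length : Int) - 1
    | some e => e
  let dups : Int := (PySem.List.pyRange 1 (e + 1) 1).foldl
    (fun acc i =>
      if PySem.List.pyGetD lst i 0 == PySem.List.pyGetD lst (i - 1) 0 then acc + 1 else acc) 0
  (lst.length : Int) - dups

-- ===== PRECONDITION & SPEC =====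
-- Pre_ excludes exactly the inputs on which Python A raises IndexError:
-- an explicit end with 0 < end and end >= len(lst).
def Pre_dedupe_lst (lst : List Int) (end_ : Option Int) : Prop :=
  end_.getD 0 ≤ 0 ∨ end_.getD 0 < (lst.length : Int)

instance (lst : List Int) (end_ : Option Int) : Decidable (Pre_dedupe_lst lst end_) := by
  unfold Pre_dedupe_lst; infer_instance

def pvWitness_dedupe_lst : List Int × Option Int := ([1, 1, 2, 2, 3], none)

def Spec_dedupe_lst (lst : List Int) (end_ : Option Int) (out : Int) : Prop := out = dedupe_lst_alt lst end_
instance (lst : List Int) (end_ : Option Int) (out : Int) : Decidable (Spec_dedupe_lst lst end_ out) := by unfold Spec_dedupe_lst; infer_instance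

-- ===== CLAIM (what is proved, stated in full; the proofs are below) =====
def Claim_equal_dedupe_lst : Prop := ∀ (lst : List Int) (end_ : Option Int), Dom_dedupe_lst lst end_ → Pre_dedupe_lst lst end_ → Spec_dedupe_lst lst end_ (dedupe_lst lst end_)

-- ===== LEMMAS AND PROOFS =====

-- B's count of adjacent-equal pairs at indices 1..e of lst.
def pvCnt (lst : List Int) (e : Int) : Int :=
  (PySem.List.pyRange 1 (e + 1) 1).foldl
    (fun acc i =>
      if PySem.List.pyGetD lst i 0 == PySem.List.pyGetD lst (i - 1) 0 then acc + 1 else acc) 0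

lemma pvCnt_nonpos (lst : List Int) (e : Int) (h : e ≤ 0) : pvCnt lst e = 0 := by
  unfold pvCnt
  rw [PySem.List.pyRange_one_eq_nil (by omega)]
  rfl

lemma pvCnt_succ (lst : List Int) (e : Int) (h : 0 ≤ e) :
    pvCnt lst (e + 1) = pvCnt lst e +
      (if PySem.List.pyGetD lst (e + 1) 0 == PySem.List.pyGetD lst e 0 then 1 else 0) := by
  unfold pvCnt
  rw [PySem.List.pyRange_one_succ_right (by omega), List.foldl_append]
  simp only [List.foldl_cons, List.foldl_nil]
  rw [show e + 1 - 1 = e from by ring]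
  split_ifs <;> ring

lemma pvCnt_dropLast (lst : List Int) (e : Int) (h : e + 1 < (lst.length : Int)) :
    pvCnt lst.dropLast e = pvCnt lst e := by
  unfold pvCnt
  apply PySem.List.foldl_congr_mem
  intro acc i hi
  rw [PySem.List.mem_pyRange_one] at hi
  have h1 : PySem.List.pyGetD lst.dropLast i 0 = PySem.List.pyGetD lst i 0 := by
    rw [PySem.List.pyGetD_eq_getElem _ _ (by omega) (by simp; omega),
        PySem.List.pyGetD_eq_getElem _ _ (by omega) (by omega)]
    rw [List.getElem_dropLast]
  have h2 : PySem.List.pyGetD lst.dropLast (i - 1) 0 = PySem.List.pyGetD lst (i - 1) 0 := by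
    rw [PySem.List.pyGetD_eq_getElem _ _ (by omega) (by simp; omega),
        PySem.List.pyGetD_eq_getElem _ _ (by omega) (by omega)]
    rw [List.getElem_dropLast]
  rw [h1, h2]

lemma core_eq (n : Nat) : ∀ (lst : List Int), n < lst.length →
    dedupe_lst_core lst (n : Int) = (lst.length : Int) - pvCnt lst (n : Int) := by
  induction n with
  | zero =>
      intro lst _
      simp only [Nat.cast_zero]
      rw [dedupe_lst_core, pvCnt_nonpos lst 0 le_rfl]
      simp
  | succ n ih =>
      intro lst hlen
      rw [show ((n + 1 : Nat) : Int) = (n : Int) + 1 from by omega]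
      rw [dedupe_lst_core]
      have hne : ¬ ((n : Int) + 1 ≤ 0) := by omega
      have hg1 : PySem.List.pyGet? lst ((n : Int) + 1) = some lst[n + 1] := by
        have h := PySem.List.pyGet?_natCast lst (n + 1)
        rw [List.getElem?_eq_getElem hlen] at h
        rw [show ((n : Int) + 1) = ((n + 1 : Nat) : Int) from by omega]
        exact h
      have hg0 : PySem.List.pyGet? lst ((n : Int) + 1 - 1) = some lst[n] := by
        have h := PySem.List.pyGet?_natCast lst n
        rw [List.getElem?_eq_getElem (by omega : n < lst.length)] at h
        rw [show ((n : Int) + 1 - 1) = ((n : Nat) : Int) from by omega]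
        exact h
      rw [if_neg hne, hg1, hg0]
      dsimp only
      have hcnt := pvCnt_succ lst (n : Int) (by omega)
      have hget1 : PySem.List.pyGetD lst ((n : Int) + 1) 0 = lst[n + 1] := by
        rw [PySem.List.pyGetD_eq_getElem _ _ (by omega) (by omega)]
        congr 1
      have hget0 : PySem.List.pyGetD lst ((n : Int)) 0 = lst[n] := by
        rw [PySem.List.pyGetD_eq_getElem _ _ (by omega) (by omega)]
        congr 1
      by_cases hab : lst[n + 1] == lst[n]
      · rw [if_pos hab]
        have hdl : n < lst.dropLast.length := by simp; omega
        have := ih lst.dropLast hdl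
        rw [show ((n : Int) + 1 - 1) = (n : Int) by ring, this,
            pvCnt_dropLast lst (n : Int) (by omega)]
        rw [hcnt, hget1, hget0, if_pos hab]
        simp; omega
      · rw [if_neg hab]
        have := ih lst (by omega)
        rw [show ((n : Int) + 1 - 1) = (n : Int) by ring, this]
        rw [hcnt, hget1, hget0, if_neg hab]
        ring

lemma core_eq_int (e : Int) (lst : List Int) (h0 : 0 ≤ e) (h1 : e < (lst.length : Int)) :
    dedupe_lst_core lst e = (lst.length : Int) - pvCnt lst e := by
  obtain ⟨n, rfl⟩ := Int.eq_ofNat_of_zero_le h0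
  exact core_eq n lst (by exact_mod_cast h1)

lemma core_eq_nonpos (e : Int) (lst : List Int) (h : e ≤ 0) :
    dedupe_lst_core lst e = (lst.length : Int) - pvCnt lst e := by
  rw [dedupe_lst_core, if_pos h, pvCnt_nonpos lst e h]
  ring

-- ===== VERDICT (by name: the statement is the Claim_ definition above) =====
theorem dedupe_lst_spec : Claim_equal_dedupe_lst := by
  intro lst end_ _ hpre
  unfold Spec_dedupe_lst dedupe_lst dedupe_lst_alt
  cases end_ with
  | none =>
      simp only
      by_cases h : (lst.length : Int) - 1 ≤ 0
      · rw [core_eq_nonpos _ _ h]; rfl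
      · rw [core_eq_int _ _ (by omega) (by omega)]; rfl
  | some e =>
      simp only
      unfold Pre_dedupe_lst at hpre
      simp only [Option.getD_some] at hpre
      by_cases h : e ≤ 0
      · rw [core_eq_nonpos _ _ h]; rfl
      · rcases hpre with h' | h'
        · omega
        · rw [core_eq_int _ _ (by omega) h']; rfl
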